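-- pv_equiv track=rewrite | github.com/pypi-data/pypi-mirror-203 | packages/cpp2py/cpp2py-0.0.2-py3-none-any.whl/cpp2py/cparselite.py | parse_param_list
-- ===== SOURCE A (Python) =====
-- def parse_param_list(param_str_list):
--     """
--
--     :param param_str_list: ['unsigned char *axis', ' unsigned short int rwcom', ' unsigned int data']
--     :return:
--     """
--     param_list = []
--     for i in param_str_list:
--         curr_param_list = i.split(' ')
--         while '' in curr_param_list:
--             curr_param_list.remove('')
--         if len(curr_param_list)==0:
--             # i 是空数组，
--             continue
--
--         while (len(curr_param_list[-1])>0) and (curr_param_list[-1][0]=='*'):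
--             # 处理指针-20221001
--             curr_param_list.insert(-1, '*')
--             curr_param_list[-1]=curr_param_list[-1][1:]
--
--         param_name = curr_param_list[-1]
--         param_type = curr_param_list[0:-1]
--         param_list.append((param_name, param_type))
--
--     return param_list
-- ===== SOURCE B (Python) =====
-- def parse_param_list(param_str_list):
--     param_list = []
--     for s in param_str_list:
--         tokens = [t for t in s.split(' ') if t]
--         if not tokens:
--             continue
--         last = tokens[-1]
--         k = len(last) - len(last.lstrip('*'))
--         param_list.append((last[k:], tokens[:-1] + ['*'] * k))
--     return param_list
-- ===== Notes on version B (the rewrite author's own statement) =====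
-- stated objective: simpler
-- what changed: Replaces the in-place remove('') loop and the insert(-1,'*')/strip mutation loop with a filtering comprehension and a closed-form leading-asterisk count (k from lstrip), building name and type directly from slices.
import Mathlib
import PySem

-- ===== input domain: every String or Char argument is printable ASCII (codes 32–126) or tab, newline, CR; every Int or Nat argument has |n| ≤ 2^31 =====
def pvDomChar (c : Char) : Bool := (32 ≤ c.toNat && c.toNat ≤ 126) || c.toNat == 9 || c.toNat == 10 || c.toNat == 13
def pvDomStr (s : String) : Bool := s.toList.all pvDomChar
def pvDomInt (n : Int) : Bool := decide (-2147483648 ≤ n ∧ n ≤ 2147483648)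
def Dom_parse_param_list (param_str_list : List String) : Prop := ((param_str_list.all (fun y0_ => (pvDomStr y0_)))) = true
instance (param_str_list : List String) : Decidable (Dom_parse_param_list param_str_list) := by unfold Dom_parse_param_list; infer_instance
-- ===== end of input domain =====

-- B replaces A's in-place remove('')/insert(-1,'*') mutation loops by a filter and a
-- closed-form leading-'*' count; objective: simpler.

-- ===== PORT A =====
-- while '' in curr_param_list: curr_param_list.remove('')  (list.remove = erase first match)
def pvRemoveEmpty (l : List String) : List String :=
  if "" ∈ l then pvRemoveEmpty (l.erase "")
  else l
termination_by l.length
decreasing_by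
  rename_i h
  have h0 : l ≠ [] := by rintro rfl; simp at h
  rw [List.length_erase_of_mem h]
  have : l.length ≠ 0 := by simpa [List.length_eq_zero_iff] using h0
  omega

-- the pointer while-loop; Python's list is always front ++ [last]; last handled as code points.
-- condition: len(last)>0 and last[0]=='*'; body: front := front ++ ['*'], last := last[1:]
def pvStarLoop (front : List String) (last : List Char) : List String × List Char :=
  if last.length > 0 ∧ last.head? = some '*' then
    pvStarLoop (front ++ ["*"]) last.tail
  else (front, last)
termination_by last.length
decreasing_by simp_all [List.length_tail]

def parse_param_list (param_str_list : List String) : List (String × List String) :=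
  param_str_list.foldl (fun param_list i =>
    let curr := pvRemoveEmpty ((PySem.Str.split? i " ").getD [])
    if curr.length = 0 then param_list
    else
      let (front, last) := pvStarLoop curr.dropLast (curr.getLastD "").toList
      param_list ++ [(String.ofList last, front)]) []

-- ===== PORT B =====
def parse_param_list_alt (param_str_list : List String) : List (String × List String) :=
  param_str_list.foldl (fun acc s =>
    let tokens := ((PySem.Str.split? s " ").getD []).filter (fun t => t ≠ "")
    match tokens.getLast? with
    | none => acc
    | some last =>
      -- k = len(last) - len(last.lstrip('*')): lstrip('*') ported by hand as dropWhile (· == '*'), exact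
      let k := last.length - (last.toList.dropWhile (· == '*')).length
      acc ++ [(String.ofList (last.toList.drop k), tokens.dropLast ++ List.replicate k "*")]) []

-- ===== PRECONDITION & SPEC =====
def Spec_parse_param_list (param_str_list : List String) (out : List (String × List String)) : Prop := out = parse_param_list_alt param_str_list
instance (param_str_list : List String) (out : List (String × List String)) : Decidable (Spec_parse_param_list param_str_list out) := by unfold Spec_parse_param_list; infer_instance

-- ===== CLAIM (what is proved, stated in full; the proofs are below) =====
def Claim_equal_parse_param_list : Prop := ∀ (param_str_list : List String), Dom_parse_param_list param_str_list → Spec_parse_param_list param_str_list (parse_param_list param_str_list)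

-- ===== LEMMAS AND PROOFS =====

-- erasing an element makes the '' removal loop converge to filter
lemma filter_erase_empty (l : List String) :
    (l.erase "").filter (fun t => t ≠ "") = l.filter (fun t => t ≠ "") := by
  induction l with
  | nil => simp
  | cons x xs ih =>
    by_cases hx : x = ""
    · subst hx; simp [List.erase_cons]
    · simp [List.erase_cons, hx, List.filter_cons]
      simpa using ih

lemma pvRemoveEmpty_eq_filter (l : List String) :
    pvRemoveEmpty l = l.filter (fun t => t ≠ "") := by
  induction l using pvRemoveEmpty.induct with
  | case1 l h ih =>
    rw [pvRemoveEmpty, if_pos h, ih, filter_erase_empty]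
  | case2 l h =>
    rw [pvRemoveEmpty, if_neg h, List.filter_eq_self.2]
    intro a ha
    simp only [ne_eq, decide_eq_true_eq]
    exact fun e => h (e ▸ ha)

lemma pvStarLoop_eq (front : List String) (last : List Char) :
    pvStarLoop front last =
      (front ++ List.replicate (last.takeWhile (· == '*')).length "*",
       last.drop (last.takeWhile (· == '*')).length) := by
  induction last generalizing front with
  | nil => rw [pvStarLoop]; simp
  | cons c cs ih =>
    by_cases hc : c = '*'
    · subst hc
      rw [pvStarLoop, if_pos (by simp)]
      simp only [List.tail_cons, ih]
      simp [List.takeWhile_cons, List.replicate_succ', List.append_assoc]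
      rw [← List.replicate_succ, List.replicate_succ']
    · rw [pvStarLoop, if_neg (by simp [hc])]
      simp [List.takeWhile_cons, hc]

-- length arithmetic: takeWhile length = length - dropWhile length
lemma takeWhile_length_eq (p : Char → Bool) (l : List Char) :
    (l.takeWhile p).length = l.length - (l.dropWhile p).length := by
  have h := List.takeWhile_append_dropWhile (p := p) (l := l)
  have : (l.takeWhile p).length + (l.dropWhile p).length = l.length := by
    rw [← List.length_append, h]
  omega

set_option maxRecDepth 8192 in
lemma step_eq (acc : List (String × List String)) (i : String) :
    (let curr := pvRemoveEmpty ((PySem.Str.split? i " ").getD [])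
     if curr.length = 0 then acc
     else
       let (front, last) := pvStarLoop curr.dropLast (curr.getLastD "").toList
       acc ++ [(String.ofList last, front)]) =
    (let tokens := ((PySem.Str.split? i " ").getD []).filter (fun t => t ≠ "")
     match tokens.getLast? with
     | none => acc
     | some last =>
       let k := last.length - (last.toList.dropWhile (· == '*')).length
       acc ++ [(String.ofList (last.toList.drop k), tokens.dropLast ++ List.replicate k "*")]) := by
  simp only [pvRemoveEmpty_eq_filter]
  set toks := ((PySem.Str.split? i " ").getD []).filter (fun t => t ≠ "") with htoks
  match hl : toks.getLast? with
  | none =>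
    have : toks = [] := List.getLast?_eq_none_iff.mp hl
    simp [this]
  | some last =>
    have hne : toks ≠ [] := by
      intro h; rw [h] at hl; simp at hl
    have hlen : toks.length ≠ 0 := by simpa [List.length_eq_zero_iff] using hne
    have hgd : toks.getLastD "" = last := by
      rw [List.getLastD_eq_getLast?, hl]; rfl
    have hk : (last.toList.takeWhile (· == '*')).length
        = last.length - (last.toList.dropWhile (· == '*')).length := by
      have := takeWhile_length_eq (· == '*') last.toList
      rw [String.length_toList] at this
      exact this
    simp only [hl, if_neg hlen, hgd, pvStarLoop_eq, hk]

lemma ports_eq (l : List String) : parse_param_list l = parse_param_list_alt l := by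
  unfold parse_param_list parse_param_list_alt
  induction l using List.reverseRecOn with
  | nil => rfl
  | append_singleton xs x ih =>
    rw [List.foldl_append, List.foldl_append, ih]
    exact step_eq _ x

-- ===== VERDICT (by name: the statement is the Claim_ definition above) =====
theorem parse_param_list_spec : Claim_equal_parse_param_list := by
  intro l _
  exact ports_eq l
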